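-- pv_equiv track=rewrite | github.com/nalio-source/abscript | main.py | special_contains
-- ===== SOURCE A (Python) =====
-- def special_contains(string, wanted, openers="[(", closers="])"):
--     cont = 0
--     for l in string:
--         if (l in openers):
--             cont += 1
--         if (l in closers):
--             cont -= 1
--         if (l == wanted) and (cont == 0):
--             return True
--     return False
-- ===== SOURCE B (Python) =====
-- def special_contains(string, wanted, openers="[(", closers="])"):
--     depths = []
--     d = 0
--     for l in string:
--         d += (l in openers) - (l in closers)
--         depths.append(d)
--     return any(l == wanted and d == 0 for l, d in zip(string, depths))
-- ===== Notes on version B (the rewrite author's own statement) =====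
-- stated objective: alternative
-- what changed: Replaces the fused counter-loop with early return by building the running bracket-depth table first and then scanning the string zipped with its depths for the wanted char at depth 0.
import Mathlib
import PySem

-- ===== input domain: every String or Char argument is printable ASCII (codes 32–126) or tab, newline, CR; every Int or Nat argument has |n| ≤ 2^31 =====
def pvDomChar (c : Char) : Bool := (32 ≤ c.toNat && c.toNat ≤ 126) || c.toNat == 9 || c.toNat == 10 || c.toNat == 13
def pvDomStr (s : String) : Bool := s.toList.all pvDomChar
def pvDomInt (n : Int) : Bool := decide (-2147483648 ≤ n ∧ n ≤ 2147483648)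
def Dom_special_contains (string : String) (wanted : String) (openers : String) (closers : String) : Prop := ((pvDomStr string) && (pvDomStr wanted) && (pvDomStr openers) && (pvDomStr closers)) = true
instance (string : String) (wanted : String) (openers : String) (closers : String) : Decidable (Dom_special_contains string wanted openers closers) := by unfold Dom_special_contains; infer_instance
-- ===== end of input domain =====

-- B builds a running bracket-depth table first, then scans the string zipped with its depths; same result, different decomposition.


-- ===== PORT A =====
-- the fused loop: update cont for openers, then closers, then early-return on the wanted char at cont = 0
def scLoopA (wanted : String) (openers : String) (closers : String) : List Char → Int → Bool
  | [], _ => false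
  | l :: rest, cont =>
    let cont1 := if PySem.Chars.isIn [l] openers.toList then cont + 1 else cont
    let cont2 := if PySem.Chars.isIn [l] closers.toList then cont1 - 1 else cont1
    if (String.mk [l] == wanted) && (cont2 == 0) then true
    else scLoopA wanted openers closers rest cont2

def special_contains (string : String) (wanted : String) (openers : String) (closers : String) : Bool :=
  scLoopA wanted openers closers string.toList 0

-- ===== PORT B =====
-- first pass: the list of running depths (inclusive prefix sums of the ±1 deltas)
def scDepthsB (openers : String) (closers : String) : List Char → Int → List Int
  | [], _ => []
  | l :: rest, d =>
    let d' := d + ((if PySem.Chars.isIn [l] openers.toList then 1 else 0)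
                 - (if PySem.Chars.isIn [l] closers.toList then 1 else 0))
    d' :: scDepthsB openers closers rest d'

def special_contains_alt (string : String) (wanted : String) (openers : String) (closers : String) : Bool :=
  (string.toList.zip (scDepthsB openers closers string.toList 0)).any
    (fun p => (String.mk [p.1] == wanted) && (p.2 == 0))

-- ===== PRECONDITION & SPEC =====
def Spec_special_contains (string : String) (wanted : String) (openers : String) (closers : String) (out : Bool) : Prop := out = special_contains_alt string wanted openers closers
instance (string : String) (wanted : String) (openers : String) (closers : String) (out : Bool) : Decidable (Spec_special_contains string wanted openers closers out) := by unfold Spec_special_contains; infer_instance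

-- ===== CLAIM (what is proved, stated in full; the proofs are below) =====
def Claim_equal_special_contains : Prop := ∀ (string : String) (wanted : String) (openers : String) (closers : String), Dom_special_contains string wanted openers closers → Spec_special_contains string wanted openers closers (special_contains string wanted openers closers)

-- ===== LEMMAS AND PROOFS =====

-- the fused loop starting at cont equals the zipped-any over the depth table starting at cont
theorem scLoop_eq_any (wanted openers closers : String) :
    ∀ (ls : List Char) (cont : Int),
      scLoopA wanted openers closers ls cont
        = (ls.zip (scDepthsB openers closers ls cont)).any
            (fun p => (String.mk [p.1] == wanted) && (p.2 == 0)) := by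
  intro ls
  induction ls with
  | nil => intro cont; simp [scLoopA, scDepthsB]
  | cons l rest ih =>
    intro cont
    simp only [scLoopA, scDepthsB, List.zip_cons_cons, List.any_cons]
    have hdelta :
        (if PySem.Chars.isIn [l] closers.toList then
            (if PySem.Chars.isIn [l] openers.toList then cont + 1 else cont) - 1
          else (if PySem.Chars.isIn [l] openers.toList then cont + 1 else cont))
        = cont + ((if PySem.Chars.isIn [l] openers.toList then (1:Int) else 0)
                - (if PySem.Chars.isIn [l] closers.toList then 1 else 0)) := by
      split_ifs <;> ring
    rw [hdelta]
    by_cases h : ((String.mk [l] == wanted)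
        && (cont + ((if PySem.Chars.isIn [l] openers.toList then (1:Int) else 0)
                  - (if PySem.Chars.isIn [l] closers.toList then 1 else 0)) == 0)) = true
    · simp [h]
    · simp only [h, if_neg, Bool.false_or]
      rw [Bool.not_eq_true] at h
      simp [h, ih]

-- ===== VERDICT (by name: the statement is the Claim_ definition above) =====
theorem special_contains_spec : Claim_equal_special_contains := by
  intro string wanted openers closers _
  unfold Spec_special_contains special_contains special_contains_alt
  exact scLoop_eq_any wanted openers closers string.toList 0
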